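-- pv_equiv track=rewrite | github.com/coco-in-bluemoon/programmers-challenges | 월간 코드 챌린지 시즌 1/문자열의 아름다움/solution.py | solution
-- ===== SOURCE A (Python) =====
-- def calculate_beauty(start, end, s, ldi, rdi):
--     if s[start] != s[end]:
--         return end - start
--
--     if start > ldi[end] or end < rdi[start]:
--         return 0
--
--     return max(ldi[end] - start, end - rdi[start])
--
-- def solution(s):
--     n = len(s)
--     ldi = [0] * n
--     rdi = [0] * n
--
--     for idx in range(n):
--         ldx = idx - 1
--         rdx = idx + 1
--
--         if idx and s[idx-1] == s[idx]:
--             ldx = ldi[idx-1]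
--             rdx = rdi[idx-1]
--
--         while ldx >= 0 and s[ldx] == s[idx]:
--             ldx -= 1
--         while rdx < n and s[rdx] == s[idx]:
--             rdx += 1
--
--         ldi[idx] = ldx
--         rdi[idx] = rdx
--
--     answer = 0
--     for idx in range(n):
--         for jdx in range(idx+1, n):
--             answer += calculate_beauty(idx, jdx, s, ldi, rdi)
--
--     return answer
-- ===== SOURCE B (Python) =====
-- def solution(s):
--     # Same sum of pairwise beauties, but each pair is settled by two local run
--     # scans instead of A's precomputed ldi/rdi memo arrays.
--     n = len(s)
--     total = 0
--     for i in range(n):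
--         for j in range(i + 1, n):
--             if s[i] != s[j]:
--                 total += j - i
--                 continue
--             a = i
--             while a <= j and s[a] == s[i]:
--                 a += 1
--             if a > j:
--                 continue  # s[i..j] is a single run of one character
--             b = j
--             while s[b] == s[j]:
--                 b -= 1
--             total += max(j - a, b - i)
--     return total
-- ===== Notes on version B (the rewrite author's own statement) =====
-- stated objective: simpler
-- what changed: B drops A's memoised ldi/rdi precomputation arrays and helper entirely and settles each pair with two local run scans (forward from i, backward from j) inside the same pair loop.
import Mathlib
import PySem

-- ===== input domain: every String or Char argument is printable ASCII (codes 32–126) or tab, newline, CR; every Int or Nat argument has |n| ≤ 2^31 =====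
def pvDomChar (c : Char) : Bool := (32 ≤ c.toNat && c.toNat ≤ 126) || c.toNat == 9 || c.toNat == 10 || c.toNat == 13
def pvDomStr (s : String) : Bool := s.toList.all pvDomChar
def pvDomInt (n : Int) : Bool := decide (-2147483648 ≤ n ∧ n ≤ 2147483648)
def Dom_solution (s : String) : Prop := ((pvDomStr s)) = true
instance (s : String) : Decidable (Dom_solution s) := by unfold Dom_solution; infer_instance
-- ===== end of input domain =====

-- B replaces A's memoised ldi/rdi precomputation arrays by two local run scans per pair:
-- same O(n^2) pair sum, no auxiliary arrays (objective: alternative/simpler decomposition).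

-- ===== PORT A =====
-- while ldx >= 0 and s[ldx] == s[idx]: ldx -= 1
def pvWhileL (cs : List Char) (idx : Int) (ldx : Int) : Int :=
  if h : 0 ≤ ldx ∧ PySem.List.pyGet? cs ldx = PySem.List.pyGet? cs idx then
    pvWhileL cs idx (ldx - 1)
  else ldx
termination_by (ldx + 1).toNat
decreasing_by omega

-- while rdx < n and s[rdx] == s[idx]: rdx += 1
def pvWhileR (cs : List Char) (n idx : Int) (rdx : Int) : Int :=
  if h : rdx < n ∧ PySem.List.pyGet? cs rdx = PySem.List.pyGet? cs idx then
    pvWhileR cs n idx (rdx + 1)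
  else rdx
termination_by (n - rdx).toNat
decreasing_by omega

-- calculate_beauty; Python's ldi[end]/rdi[start] are always in range here, so pyGetD _ _ 0 is exact
def calculate_beauty (start end_ : Int) (cs : List Char) (ldi rdi : List Int) : Int :=
  if PySem.List.pyGet? cs start ≠ PySem.List.pyGet? cs end_ then end_ - start
  else if PySem.List.pyGetD ldi end_ 0 < start ∨ end_ < PySem.List.pyGetD rdi start 0 then 0
  else max (PySem.List.pyGetD ldi end_ 0 - start) (end_ - PySem.List.pyGetD rdi start 0)

-- one iteration of A's first loop (idx in range(n)); ldi[idx-1]/rdi[idx-1] in range when read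
def buildStep (cs : List Char) (n : Int) (st : List Int × List Int) (idx : Int) : List Int × List Int :=
  let p : Int × Int :=
    if idx ≠ 0 ∧ PySem.List.pyGet? cs (idx - 1) = PySem.List.pyGet? cs idx then
      (PySem.List.pyGetD st.1 (idx - 1) 0, PySem.List.pyGetD st.2 (idx - 1) 0)
    else (idx - 1, idx + 1)
  let ldx := pvWhileL cs idx p.1
  let rdx := pvWhileR cs n idx p.2
  (st.1.set idx.toNat ldx, st.2.set idx.toNat rdx)

def solution (s : String) : Int :=
  let cs := s.toList
  let n : Int := cs.length
  let st := (PySem.List.pyRange 0 n 1).foldl (buildStep cs n)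
              (List.replicate cs.length 0, List.replicate cs.length 0)
  (PySem.List.pyRange 0 n 1).foldl (fun acc idx =>
    (PySem.List.pyRange (idx + 1) n 1).foldl
      (fun acc2 jdx => acc2 + calculate_beauty idx jdx cs st.1 st.2) acc) 0

-- ===== PORT B =====
-- while a <= j and s[a] == s[i]: a += 1
def scanFwd (cs : List Char) (c : Option Char) (j a : Int) : Int :=
  if h : a ≤ j ∧ PySem.List.pyGet? cs a = c then scanFwd cs c j (a + 1) else a
termination_by (j + 1 - a).toNat
decreasing_by omega

-- while s[b] == s[j]: b -= 1   ('0 ≤ b' is a totality guard only: the loop always stops at a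
-- differing character with b > 0 on every reachable call)
def scanBack (cs : List Char) (c : Option Char) (b : Int) : Int :=
  if h : 0 ≤ b ∧ PySem.List.pyGet? cs b = c then scanBack cs c (b - 1) else b
termination_by (b + 1).toNat
decreasing_by omega

def solution_alt (s : String) : Int :=
  let cs := s.toList
  let n : Int := cs.length
  (PySem.List.pyRange 0 n 1).foldl (fun acc i =>
    (PySem.List.pyRange (i + 1) n 1).foldl (fun acc2 j =>
      if PySem.List.pyGet? cs i ≠ PySem.List.pyGet? cs j then acc2 + (j - i)
      else
        let a := scanFwd cs (PySem.List.pyGet? cs i) j i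
        if j < a then acc2
        else acc2 + max (j - a) (scanBack cs (PySem.List.pyGet? cs j) j - i)) acc) 0

-- ===== PRECONDITION & SPEC =====
def Spec_solution (s : String) (out : Int) : Prop := out = solution_alt s
instance (s : String) (out : Int) : Decidable (Spec_solution s out) := by unfold Spec_solution; infer_instance

-- ===== CLAIM (what is proved, stated in full; the proofs are below) =====
def Claim_equal_solution : Prop := ∀ (s : String), Dom_solution s → Spec_solution s (solution s)

-- ===== LEMMAS AND PROOFS =====

theorem pvWhileL_spec (cs : List Char) (idx m : Int) :
    pvWhileL cs idx m ≤ m ∧ (-1 ≤ m → -1 ≤ pvWhileL cs idx m) ∧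
    ¬(0 ≤ pvWhileL cs idx m ∧
        PySem.List.pyGet? cs (pvWhileL cs idx m) = PySem.List.pyGet? cs idx) ∧
    ∀ k : Int, pvWhileL cs idx m < k → k ≤ m →
        PySem.List.pyGet? cs k = PySem.List.pyGet? cs idx := by
  rw [pvWhileL]
  split_ifs with h
  · obtain ⟨ih1, ih2, ih3, ih4⟩ := pvWhileL_spec cs idx (m - 1)
    refine ⟨by omega, fun _ => by omega, ih3, ?_⟩
    intro k hk1 hk2
    by_cases hk : k ≤ m - 1
    · exact ih4 k hk1 hk
    · have hkm : k = m := by omega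
      rw [hkm]; exact h.2
  · exact ⟨le_rfl, fun _ => by omega, h, fun k hk1 hk2 => by omega⟩
termination_by (m + 1).toNat
decreasing_by omega

theorem pvWhileL_stop (cs : List Char) (idx m : Int)
    (h : ¬(0 ≤ m ∧ PySem.List.pyGet? cs m = PySem.List.pyGet? cs idx)) :
    pvWhileL cs idx m = m := by
  rw [pvWhileL, dif_neg h]

theorem pvWhileL_skip (cs : List Char) (idx t m : Int) (h1 : -1 ≤ t) (h2 : t ≤ m)
    (h3 : ∀ k : Int, t < k → k ≤ m → PySem.List.pyGet? cs k = PySem.List.pyGet? cs idx) :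
    pvWhileL cs idx m = pvWhileL cs idx t := by
  by_cases hm : t = m
  · rw [hm]
  · have hlt : t < m := by omega
    rw [pvWhileL, dif_pos ⟨by omega, h3 m hlt le_rfl⟩]
    exact pvWhileL_skip cs idx t (m - 1) h1 (by omega) (fun k hk1 hk2 => h3 k hk1 (by omega))
termination_by (m - t).toNat

theorem pvWhileR_spec (cs : List Char) (n idx m : Int) :
    m ≤ pvWhileR cs n idx m ∧ (m ≤ n → pvWhileR cs n idx m ≤ n) ∧
    ¬(pvWhileR cs n idx m < n ∧
        PySem.List.pyGet? cs (pvWhileR cs n idx m) = PySem.List.pyGet? cs idx) ∧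
    ∀ k : Int, m ≤ k → k < pvWhileR cs n idx m →
        PySem.List.pyGet? cs k = PySem.List.pyGet? cs idx := by
  rw [pvWhileR]
  split_ifs with h
  · obtain ⟨ih1, ih2, ih3, ih4⟩ := pvWhileR_spec cs n idx (m + 1)
    refine ⟨by omega, fun _ => by omega, ih3, ?_⟩
    intro k hk1 hk2
    by_cases hk : m + 1 ≤ k
    · exact ih4 k hk hk2
    · have hkm : k = m := by omega
      rw [hkm]; exact h.2
  · exact ⟨le_rfl, fun hmn => hmn, h, fun k hk1 hk2 => by omega⟩
termination_by (n - m).toNat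
decreasing_by omega

theorem pvWhileR_stop (cs : List Char) (n idx m : Int)
    (h : ¬(m < n ∧ PySem.List.pyGet? cs m = PySem.List.pyGet? cs idx)) :
    pvWhileR cs n idx m = m := by
  rw [pvWhileR, dif_neg h]

theorem pvWhileR_skip (cs : List Char) (n idx m t : Int) (h1 : m ≤ t) (h2 : t ≤ n)
    (h3 : ∀ k : Int, m ≤ k → k < t → PySem.List.pyGet? cs k = PySem.List.pyGet? cs idx) :
    pvWhileR cs n idx m = pvWhileR cs n idx t := by
  by_cases hm : m = t
  · rw [hm]
  · have hlt : m < t := by omega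
    rw [pvWhileR, dif_pos ⟨by omega, h3 m le_rfl hlt⟩]
    exact pvWhileR_skip cs n idx (m + 1) t (by omega) h2 (fun k hk1 hk2 => h3 k (by omega) hk2)
termination_by (t - m).toNat

theorem scanFwd_spec (cs : List Char) (c : Option Char) (j a : Int) (ha : a ≤ j + 1) :
    a ≤ scanFwd cs c j a ∧ scanFwd cs c j a ≤ j + 1 ∧
    ¬(scanFwd cs c j a ≤ j ∧ PySem.List.pyGet? cs (scanFwd cs c j a) = c) ∧
    ∀ k : Int, a ≤ k → k < scanFwd cs c j a → PySem.List.pyGet? cs k = c := by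
  rw [scanFwd]
  split_ifs with h
  · obtain ⟨ih1, ih2, ih3, ih4⟩ := scanFwd_spec cs c j (a + 1) (by omega)
    refine ⟨by omega, ih2, ih3, ?_⟩
    intro k hk1 hk2
    by_cases hk : a + 1 ≤ k
    · exact ih4 k hk hk2
    · have hkm : k = a := by omega
      rw [hkm]; exact h.2
  · exact ⟨le_rfl, by omega, h, fun k hk1 hk2 => by omega⟩
termination_by (j + 1 - a).toNat
decreasing_by omega

theorem scanBack_eq_pvWhileL (cs : List Char) (idx b : Int) :
    scanBack cs (PySem.List.pyGet? cs idx) b = pvWhileL cs idx b := by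
  rw [scanBack, pvWhileL]
  split_ifs with h
  · exact scanBack_eq_pvWhileL cs idx (b - 1)
  · rfl
termination_by (b + 1).toNat
decreasing_by omega

-- B's forward scan equals A's rdi value, capped at j+1
theorem scanFwd_val (cs : List Char) (n i j : Int) (_hi : 0 ≤ i) (hij : i < j) (hj : j < n) :
    scanFwd cs (PySem.List.pyGet? cs i) j i =
      if pvWhileR cs n i (i + 1) ≤ j then pvWhileR cs n i (i + 1) else j + 1 := by
  obtain ⟨f1, f2, f3, f4⟩ := scanFwd_spec cs (PySem.List.pyGet? cs i) j i (by omega)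
  obtain ⟨r1, r2, r3, r4⟩ := pvWhileR_spec cs n i (i + 1)
  split_ifs with hR
  · by_contra hne
    rcases lt_or_gt_of_ne hne with hlt | hgt
    · have hri : scanFwd cs (PySem.List.pyGet? cs i) j i ≠ i := by
        intro he
        exact f3 ⟨by omega, by rw [he]⟩
      exact f3 ⟨by omega, r4 _ (by omega) hlt⟩
    · exact r3 ⟨by omega, f4 _ (by omega) hgt⟩
  · by_contra hne
    have hrj : scanFwd cs (PySem.List.pyGet? cs i) j i ≤ j := by omega
    have hri : scanFwd cs (PySem.List.pyGet? cs i) j i ≠ i := by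
      intro he
      exact f3 ⟨by omega, by rw [he]⟩
    exact f3 ⟨hrj, r4 _ (by omega) (by omega)⟩

-- per-pair agreement of the two loop bodies
theorem pair_eq (cs : List Char) (ldi rdi : List Int) (i j : Int) (hi : 0 ≤ i) (hij : i < j)
    (hj : j < (cs.length : Int))
    (hL : PySem.List.pyGetD ldi j 0 = pvWhileL cs j (j - 1))
    (hR : PySem.List.pyGetD rdi i 0 = pvWhileR cs (cs.length : Int) i (i + 1)) (acc2 : Int) :
    acc2 + calculate_beauty i j cs ldi rdi =
      (if PySem.List.pyGet? cs i ≠ PySem.List.pyGet? cs j then acc2 + (j - i)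
       else
        let a := scanFwd cs (PySem.List.pyGet? cs i) j i
        if j < a then acc2
        else acc2 + max (j - a) (scanBack cs (PySem.List.pyGet? cs j) j - i)) := by
  simp only [calculate_beauty, hL, hR]
  by_cases hc : PySem.List.pyGet? cs i = PySem.List.pyGet? cs j
  · rw [if_neg (not_not_intro hc), if_neg (not_not_intro hc)]
    have hb : scanBack cs (PySem.List.pyGet? cs j) j = pvWhileL cs j (j - 1) := by
      rw [scanBack_eq_pvWhileL, pvWhileL]
      exact dif_pos ⟨by omega, rfl⟩
    rw [hb, scanFwd_val cs (cs.length : Int) i j hi hij hj]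
    obtain ⟨l1, l2, l3, l4⟩ := pvWhileL_spec cs j (j - 1)
    obtain ⟨r1, r2, r3, r4⟩ := pvWhileR_spec cs (cs.length : Int) i (i + 1)
    have claim2 : pvWhileL cs j (j - 1) < i ↔ j < pvWhileR cs (cs.length : Int) i (i + 1) := by
      constructor
      · intro hLi
        by_contra hRj
        have hgR : PySem.List.pyGet? cs (pvWhileR cs (cs.length : Int) i (i + 1)) =
            PySem.List.pyGet? cs i := by
          by_cases hRe : pvWhileR cs (cs.length : Int) i (i + 1) = j
          · rw [hRe]; exact hc.symm
          · rw [l4 _ (by omega) (by omega)]; exact hc.symm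
        exact r3 ⟨by omega, hgR⟩
      · intro hRj
        by_contra hLi
        have hgL : PySem.List.pyGet? cs (pvWhileL cs j (j - 1)) = PySem.List.pyGet? cs j := by
          by_cases hLe : pvWhileL cs j (j - 1) = i
          · rw [hLe]; exact hc
          · rw [r4 _ (by omega) (by omega)]; exact hc
        exact l3 ⟨by omega, hgL⟩
    by_cases hz : j < pvWhileR cs (cs.length : Int) i (i + 1)
    · rw [if_pos (Or.inr hz), if_neg (by omega : ¬pvWhileR cs (cs.length : Int) i (i + 1) ≤ j),
        if_pos (by omega : j < j + 1)]
      ring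
    · rw [if_neg (not_or_intro (fun h => hz (claim2.mp h)) hz),
        if_pos (by omega : pvWhileR cs (cs.length : Int) i (i + 1) ≤ j),
        if_neg hz]
      rw [max_comm]
  · rw [if_pos hc, if_pos hc]

-- invariant of A's first loop: ldi/rdi hold the plain while-scan values (the memo shortcut is sound)
theorem build_inv (cs : List Char) (m : Nat) (hm : m ≤ cs.length) :
    ((PySem.List.pyRange 0 (m : Int) 1).foldl (buildStep cs (cs.length : Int))
        (List.replicate cs.length 0, List.replicate cs.length 0)).1.length = cs.length ∧
    ((PySem.List.pyRange 0 (m : Int) 1).foldl (buildStep cs (cs.length : Int))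
        (List.replicate cs.length 0, List.replicate cs.length 0)).2.length = cs.length ∧
    ∀ k : Int, 0 ≤ k → k < (m : Int) →
      PySem.List.pyGetD ((PySem.List.pyRange 0 (m : Int) 1).foldl (buildStep cs (cs.length : Int))
          (List.replicate cs.length 0, List.replicate cs.length 0)).1 k 0 = pvWhileL cs k (k - 1) ∧
      PySem.List.pyGetD ((PySem.List.pyRange 0 (m : Int) 1).foldl (buildStep cs (cs.length : Int))
          (List.replicate cs.length 0, List.replicate cs.length 0)).2 k 0 =
        pvWhileR cs (cs.length : Int) k (k + 1) := by
  induction m with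
  | zero =>
    rw [PySem.List.pyRange_one_eq_nil (by omega)]
    exact ⟨by simp, by simp, fun k hk1 hk2 => absurd hk2 (by omega)⟩
  | succ m ih =>
    obtain ⟨ih1, ih2, ih3⟩ := ih (by omega)
    have hsplit : PySem.List.pyRange 0 ((m + 1 : Nat) : Int) 1 =
        PySem.List.pyRange 0 (m : Int) 1 ++ [(m : Int)] := by
      push_cast
      exact PySem.List.pyRange_one_succ_right (by omega)
    rw [hsplit, List.foldl_append]
    set st := (PySem.List.pyRange 0 (m : Int) 1).foldl (buildStep cs (cs.length : Int))
      (List.replicate cs.length 0, List.replicate cs.length 0) with hst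
    simp only [List.foldl_cons, List.foldl_nil]
    have hmn : (m : Int) < (cs.length : Int) := by omega
    -- the two values written at index m are the plain scan values
    have hval : (buildStep cs (cs.length : Int) st (m : Int)).1 =
          st.1.set m (pvWhileL cs (m : Int) ((m : Int) - 1)) ∧
        (buildStep cs (cs.length : Int) st (m : Int)).2 =
          st.2.set m (pvWhileR cs (cs.length : Int) (m : Int) ((m : Int) + 1)) := by
      by_cases cb : (m : Int) ≠ 0 ∧
          PySem.List.pyGet? cs ((m : Int) - 1) = PySem.List.pyGet? cs (m : Int)
      · obtain ⟨hm0, hcc⟩ := cb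
        obtain ⟨hp1, hp2⟩ := ih3 ((m : Int) - 1) (by omega) (by omega)
        have hl : pvWhileL cs (m : Int) (pvWhileL cs ((m : Int) - 1) ((m : Int) - 1 - 1)) =
            pvWhileL cs (m : Int) ((m : Int) - 1) := by
          obtain ⟨s1, s2, s3, s4⟩ := pvWhileL_spec cs ((m : Int) - 1) ((m : Int) - 1 - 1)
          have hr1 : -1 ≤ pvWhileL cs ((m : Int) - 1) ((m : Int) - 1 - 1) := s2 (by omega)
          have heq : ∀ k : Int, pvWhileL cs ((m : Int) - 1) ((m : Int) - 1 - 1) < k →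
              k ≤ (m : Int) - 1 → PySem.List.pyGet? cs k = PySem.List.pyGet? cs (m : Int) := by
            intro k h1 h2
            by_cases hk : k ≤ (m : Int) - 1 - 1
            · rw [s4 k h1 hk]; exact hcc
            · have hke : k = (m : Int) - 1 := by omega
              rw [hke]; exact hcc
          have hstop : pvWhileL cs (m : Int) (pvWhileL cs ((m : Int) - 1) ((m : Int) - 1 - 1)) =
              pvWhileL cs ((m : Int) - 1) ((m : Int) - 1 - 1) := by
            refine pvWhileL_stop _ _ _ ?_
            rintro ⟨h0, hg⟩
            exact s3 ⟨h0, by rw [hg]; exact hcc.symm⟩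
          rw [pvWhileL_skip cs (m : Int) (pvWhileL cs ((m : Int) - 1) ((m : Int) - 1 - 1))
            ((m : Int) - 1) hr1 (by omega) heq, hstop]
        have hr : pvWhileR cs (cs.length : Int) (m : Int)
              (pvWhileR cs (cs.length : Int) ((m : Int) - 1) ((m : Int) - 1 + 1)) =
            pvWhileR cs (cs.length : Int) (m : Int) ((m : Int) + 1) := by
          obtain ⟨t1, t2, t3, t4⟩ :=
            pvWhileR_spec cs (cs.length : Int) ((m : Int) - 1) ((m : Int) - 1 + 1)
          have ht2 : pvWhileR cs (cs.length : Int) ((m : Int) - 1) ((m : Int) - 1 + 1) ≤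
              (cs.length : Int) := t2 (by omega)
          have hr'' : (m : Int) + 1 ≤
              pvWhileR cs (cs.length : Int) ((m : Int) - 1) ((m : Int) - 1 + 1) := by
            by_contra hcon
            have hre : pvWhileR cs (cs.length : Int) ((m : Int) - 1) ((m : Int) - 1 + 1) =
                (m : Int) := by omega
            exact t3 (by rw [hre]; exact ⟨hmn, hcc.symm⟩)
          have hstop : pvWhileR cs (cs.length : Int) (m : Int)
              (pvWhileR cs (cs.length : Int) ((m : Int) - 1) ((m : Int) - 1 + 1)) =
              pvWhileR cs (cs.length : Int) ((m : Int) - 1) ((m : Int) - 1 + 1) := by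
            refine pvWhileR_stop _ _ _ _ ?_
            rintro ⟨hn, hg⟩
            exact t3 ⟨hn, by rw [hg]; exact hcc.symm⟩
          have heq : ∀ k : Int, (m : Int) + 1 ≤ k →
              k < pvWhileR cs (cs.length : Int) ((m : Int) - 1) ((m : Int) - 1 + 1) →
              PySem.List.pyGet? cs k = PySem.List.pyGet? cs (m : Int) := by
            intro k h1 h2
            rw [t4 k (by omega) h2]; exact hcc
          rw [pvWhileR_skip cs (cs.length : Int) (m : Int) ((m : Int) + 1)
            (pvWhileR cs (cs.length : Int) ((m : Int) - 1) ((m : Int) - 1 + 1)) hr'' ht2 heq,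
            hstop]
        simp only [buildStep, if_pos (⟨hm0, hcc⟩ :
          (m : Int) ≠ 0 ∧ PySem.List.pyGet? cs ((m : Int) - 1) = PySem.List.pyGet? cs (m : Int)),
          hp1, hp2, Int.toNat_natCast]
        exact ⟨by rw [hl], by rw [hr]⟩
      · simp only [buildStep, if_neg cb, Int.toNat_natCast]
        exact ⟨by trivial, by trivial⟩
    rw [hval.1, hval.2]
    refine ⟨by simp [List.length_set, ih1], by simp [List.length_set, ih2], ?_⟩
    intro k hk0 hkm1
    have hkl : k < (cs.length : Int) := by omega
    by_cases hk : k < (m : Int)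
    · obtain ⟨o1, o2⟩ := ih3 k hk0 hk
      constructor
      · rw [PySem.List.pyGetD_eq_getElem _ _ hk0 (by rw [List.length_set, ih1]; omega),
          List.getElem_set_ne (by omega), ← PySem.List.pyGetD_eq_getElem _ (0 : Int) hk0
            (by rw [ih1]; omega)]
        exact o1
      · rw [PySem.List.pyGetD_eq_getElem _ _ hk0 (by rw [List.length_set, ih2]; omega),
          List.getElem_set_ne (by omega), ← PySem.List.pyGetD_eq_getElem _ (0 : Int) hk0
            (by rw [ih2]; omega)]
        exact o2
    · have hke : k = (m : Int) := by omega
      subst hke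
      constructor
      · rw [PySem.List.pyGetD_eq_getElem _ _ hk0 (by rw [List.length_set, ih1]; omega)]
        simp only [Int.toNat_natCast]
        exact List.getElem_set_self (by rw [List.length_set, ih1]; omega)
      · rw [PySem.List.pyGetD_eq_getElem _ _ hk0 (by rw [List.length_set, ih2]; omega)]
        simp only [Int.toNat_natCast]
        exact List.getElem_set_self (by rw [List.length_set, ih2]; omega)

-- ===== VERDICT (by name: the statement is the Claim_ definition above) =====
theorem solution_spec : Claim_equal_solution := by
  intro s _
  show solution s = solution_alt s
  obtain ⟨h1, h2, h3⟩ := build_inv s.toList s.toList.length le_rfl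
  unfold solution solution_alt
  dsimp only
  apply PySem.List.foldl_congr_mem
  intro acc i hi
  rw [PySem.List.mem_pyRange_one] at hi
  apply PySem.List.foldl_congr_mem
  intro acc2 j hj
  rw [PySem.List.mem_pyRange_one] at hj
  exact pair_eq s.toList _ _ i j (by omega) (by omega) (by omega)
    (h3 j (by omega) (by omega)).1 (h3 i (by omega) (by omega)).2 acc2
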